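-- pv_equiv track=rewrite | github.com/cryle1205/CS313E | Intervals.py | sort_by_interval_size
-- ===== SOURCE A (Python) =====
-- def sort_by_interval_size (tuples_list):
--     for i in range(len(tuples_list) - 1):
--         for j in range(i, len(tuples_list)):
--             current = tuples_list[i][1] - tuples_list[i][0]
--             next = tuples_list[j][1] - tuples_list[j][0]
--             if next < current:
--                 tuples_list[i], tuples_list[j] = tuples_list[j], tuples_list[i]
--             elif current < next:
--                 tuples_list[i], tuples_list[j] = tuples_list[i], tuples_list[j]
--             elif next == current:
--                 if tuples_list[i][0] < tuples_list[j][0]: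
--                     tuples_list[i], tuples_list[j] = tuples_list[i], tuples_list[j]
--                 else:
--                     tuples_list[i], tuples_list[j] = tuples_list[j], tuples_list[i]
--     return tuples_list
-- ===== SOURCE B (Python) =====
-- def sort_by_interval_size(tuples_list):
--     tuples_list.sort(key=lambda t: (t[1] - t[0], t[0]))
--     return tuples_list
-- ===== Notes on version B (the rewrite author's own statement) =====
-- stated objective: faster
-- what changed: Replaces the quadratic nested-loop swap-with-every-smaller selection sort by a single in-place list.sort (Timsort) with key (end-start, start), which gives the identical ordering because that key is injective on (start, end) pairs.
import Mathlib
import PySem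

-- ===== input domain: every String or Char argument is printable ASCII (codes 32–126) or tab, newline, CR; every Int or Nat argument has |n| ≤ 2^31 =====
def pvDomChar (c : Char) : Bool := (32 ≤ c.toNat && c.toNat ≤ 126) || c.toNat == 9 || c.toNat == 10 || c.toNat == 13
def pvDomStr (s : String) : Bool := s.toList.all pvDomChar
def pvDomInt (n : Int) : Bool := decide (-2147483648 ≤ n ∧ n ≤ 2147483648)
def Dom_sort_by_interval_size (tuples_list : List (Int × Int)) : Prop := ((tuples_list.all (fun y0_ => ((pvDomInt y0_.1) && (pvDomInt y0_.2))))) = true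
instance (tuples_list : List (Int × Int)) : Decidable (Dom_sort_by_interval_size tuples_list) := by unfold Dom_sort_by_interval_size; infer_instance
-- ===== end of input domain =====

-- B replaces A's quadratic nested-loop swap sort by one built-in stable sort (list.sort with
-- key (end-start, start)); both Pythons sort the argument list in place and return it — the
-- theorems below are about the returned value.

-- ===== PORT A =====
-- Python's simultaneous 'l[i], l[j] = l[j], l[i]': both reads happen first, then the two writes.
def pvSwap (l : List (Int × Int)) (i j : Int) : List (Int × Int) :=
  PySem.List.pySetD (PySem.List.pySetD l i (PySem.List.pyGetD l j ((0 : Int), (0 : Int)))) j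
    (PySem.List.pyGetD l i ((0 : Int), (0 : Int)))

-- one inner-loop body iteration; the branches that write back exactly the values just read
-- ('l[i], l[j] = l[i], l[j]') are identity assignments and are ported as 'l'
def pvInner (i : Int) (l : List (Int × Int)) (j : Int) : List (Int × Int) :=
  let ti := PySem.List.pyGetD l i ((0 : Int), (0 : Int))
  let tj := PySem.List.pyGetD l j ((0 : Int), (0 : Int))
  let current := ti.2 - ti.1
  let next := tj.2 - tj.1
  if next < current then pvSwap l i j
  else if current < next then l
  else if next = current then
    (if ti.1 < tj.1 then l else pvSwap l i j)
  else l

def sort_by_interval_size (tuples_list : List (Int × Int)) : List (Int × Int) :=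
  (PySem.List.pyRange 0 ((tuples_list.length : Int) - 1) 1).foldl
    (fun l i => (PySem.List.pyRange i (l.length : Int) 1).foldl (fun l2 j => pvInner i l2 j) l)
    tuples_list

-- ===== PORT B =====
def sort_by_interval_size_alt (tuples_list : List (Int × Int)) : List (Int × Int) :=
  PySem.List.sorted2 tuples_list (fun t => t.2 - t.1) (fun t => t.1)

-- ===== PRECONDITION & SPEC =====
def Spec_sort_by_interval_size (tuples_list : List (Int × Int)) (out : List (Int × Int)) : Prop := out = sort_by_interval_size_alt tuples_list
instance (tuples_list : List (Int × Int)) (out : List (Int × Int)) : Decidable (Spec_sort_by_interval_size tuples_list out) := by unfold Spec_sort_by_interval_size; infer_instance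

-- ===== CLAIM (what is proved, stated in full; the proofs are below) =====
def Claim_equal_sort_by_interval_size : Prop := ∀ (tuples_list : List (Int × Int)), Dom_sort_by_interval_size tuples_list → Spec_sort_by_interval_size tuples_list (sort_by_interval_size tuples_list)

-- ===== LEMMAS AND PROOFS =====

-- the sort key, packed into a lexicographically ordered pair
def pvKey (t : Int × Int) : Lex (Int × Int) := toLex (t.2 - t.1, t.1)

-- A swaps l[i] and l[j] exactly when key(l[j]) ≤lex key(l[i])
def pvSwapCond (a x : Int × Int) : Bool :=
  decide (x.2 - x.1 < a.2 - a.1) || (!decide (a.2 - a.1 < x.2 - x.1) && !decide (a.1 < x.1))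

-- the inner loop, described recursively: pvGo a xs = (min element, the rest in A's order)
def pvGo : (Int × Int) → List (Int × Int) → (Int × Int) × List (Int × Int)
  | a, [] => (a, [])
  | a, x :: xs =>
    if pvSwapCond a x then
      let r := pvGo x xs; (r.1, a :: r.2)
    else
      let r := pvGo a xs; (r.1, x :: r.2)

theorem pvGo_length (a : Int × Int) (xs : List (Int × Int)) : (pvGo a xs).2.length = xs.length := by
  induction xs generalizing a with
  | nil => rfl
  | cons x xs ih => simp only [pvGo]; split <;> simp [ih]

-- the whole algorithm, described recursively (selection sort)
def pvSSort : List (Int × Int) → List (Int × Int)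
  | [] => []
  | a :: xs => (pvGo a xs).1 :: pvSSort (pvGo a xs).2
  termination_by l => l.length
  decreasing_by simp [pvGo_length a xs]

theorem pvGo_perm (a : Int × Int) (xs : List (Int × Int)) :
    ((pvGo a xs).1 :: (pvGo a xs).2).Perm (a :: xs) := by
  induction xs generalizing a with
  | nil => rfl
  | cons x xs ih =>
    simp only [pvGo]
    split
    · exact (List.Perm.swap _ _ _).trans ((ih x).cons a)
    · exact (List.Perm.swap _ _ _).trans (((ih a).cons x).trans (List.Perm.swap _ _ _))

theorem pvGetD_mid (pre suf : List (Int × Int)) (a d : Int × Int) :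
    (pre ++ a :: suf).getD pre.length d = a := by
  induction pre with
  | nil => rfl
  | cons p ps _ => simp

theorem pvSet_mid (pre suf : List (Int × Int)) (a v : Int × Int) :
    (pre ++ a :: suf).set pre.length v = pre ++ v :: suf := by
  induction pre with
  | nil => rfl
  | cons p ps ih => simp [ih]

theorem pvSwapCond_true {a x : Int × Int} (h : pvSwapCond a x = true) : pvKey x ≤ pvKey a := by
  simp only [pvSwapCond, Bool.or_eq_true, Bool.and_eq_true, Bool.not_eq_true',
    decide_eq_true_eq, decide_eq_false_iff_not] at h
  simp only [pvKey, Prod.Lex.toLex_le_toLex]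
  omega

theorem pvSwapCond_false {a x : Int × Int} (h : pvSwapCond a x = false) : pvKey a ≤ pvKey x := by
  simp only [pvSwapCond, Bool.or_eq_false_iff, Bool.and_eq_false_iff, Bool.not_eq_false',
    decide_eq_true_eq, decide_eq_false_iff_not] at h
  simp only [pvKey, Prod.Lex.toLex_le_toLex]
  omega

theorem pvGo_min (a : Int × Int) (xs : List (Int × Int)) :
    ∀ y ∈ a :: xs, pvKey (pvGo a xs).1 ≤ pvKey y := by
  induction xs generalizing a with
  | nil => intro y hy; simp at hy; simp [pvGo, hy]
  | cons x xs ih =>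
    intro y hy
    by_cases h : pvSwapCond a x
    · have hm : (pvGo a (x :: xs)).1 = (pvGo x xs).1 := by simp [pvGo, h]
      rw [hm]
      rcases List.mem_cons.1 hy with h1 | hy'
      · rw [h1]; exact le_trans (ih x x List.mem_cons_self) (pvSwapCond_true h)
      · exact ih x y hy'
    · have hm : (pvGo a (x :: xs)).1 = (pvGo a xs).1 := by simp [pvGo, h]
      rw [hm]
      rcases List.mem_cons.1 hy with h1 | hy'
      · rw [h1]; exact ih a a List.mem_cons_self
      · rcases List.mem_cons.1 hy' with h2 | hy''
        · rw [h2]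
          exact le_trans (ih a a List.mem_cons_self) (pvSwapCond_false (Bool.eq_false_iff.2 h))
        · exact ih a y (List.mem_cons_of_mem a hy'')

theorem pvSSort_perm (l : List (Int × Int)) : (pvSSort l).Perm l := by
  induction l using pvSSort.induct with
  | case1 => simp [pvSSort]
  | case2 a xs ih => rw [pvSSort]; exact (ih.cons (pvGo a xs).1).trans (pvGo_perm a xs)

theorem pvSSort_pairwise (l : List (Int × Int)) :
    (pvSSort l).Pairwise (fun p q => pvKey p ≤ pvKey q) := by
  induction l using pvSSort.induct with
  | case1 => simp [pvSSort]
  | case2 a xs ih =>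
    rw [pvSSort]
    refine List.Pairwise.cons (fun y hy => ?_) ih
    have hyt : y ∈ (pvGo a xs).2 := ((pvSSort_perm _).mem_iff).1 hy
    exact pvGo_min a xs y ((pvGo_perm a xs).mem_iff.1 (List.mem_cons_of_mem _ hyt))

-- bridging A's index-based inner loop to pvGo
theorem pvInner_at (pre mid suf : List (Int × Int)) (cur x : Int × Int) :
    pvInner (pre.length : Int) (pre ++ cur :: (mid ++ x :: suf))
      ((pre.length : Int) + 1 + (mid.length : Int))
    = if pvSwapCond cur x then pre ++ x :: (mid ++ cur :: suf)
      else pre ++ cur :: (mid ++ x :: suf) := by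
  have hj : (pre.length : Int) + 1 + (mid.length : Int) = (((pre ++ cur :: mid).length : Nat) : Int) := by
    simp only [List.length_append, List.length_cons]
    push_cast
    ring
  have hsplit : pre ++ cur :: (mid ++ x :: suf) = (pre ++ cur :: mid) ++ x :: suf := by simp
  have hti : PySem.List.pyGetD (pre ++ cur :: (mid ++ x :: suf)) (pre.length : Int) ((0:Int),(0:Int)) = cur := by
    rw [PySem.List.pyGetD_natCast]; exact pvGetD_mid _ _ _ _
  have htj : PySem.List.pyGetD (pre ++ cur :: (mid ++ x :: suf))
      ((pre.length : Int) + 1 + (mid.length : Int)) ((0:Int),(0:Int)) = x := by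
    rw [hj, PySem.List.pyGetD_natCast, hsplit]; exact pvGetD_mid _ _ _ _
  have hswap : pvSwap (pre ++ cur :: (mid ++ x :: suf)) (pre.length : Int)
      ((pre.length : Int) + 1 + (mid.length : Int)) = pre ++ x :: (mid ++ cur :: suf) := by
    rw [pvSwap, hti, htj, hj]
    rw [PySem.List.pySetD_natCast, PySem.List.pySetD_natCast, pvSet_mid]
    have h2 : pre ++ x :: (mid ++ x :: suf) = (pre ++ x :: mid) ++ x :: suf := by simp
    have hlen : (pre ++ cur :: mid).length = (pre ++ x :: mid).length := by simp
    rw [h2, hlen, pvSet_mid]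
    simp
  simp only [pvInner, hti, htj, hswap]
  by_cases hsc : pvSwapCond cur x
  · rw [if_pos hsc]
    simp only [pvSwapCond, Bool.or_eq_true, Bool.and_eq_true, Bool.not_eq_true',
      decide_eq_true_eq, decide_eq_false_iff_not] at hsc
    split_ifs <;> first | rfl | (exfalso; omega)
  · rw [if_neg hsc]
    simp only [pvSwapCond, Bool.or_eq_true, Bool.and_eq_true, Bool.not_eq_true',
      decide_eq_true_eq, decide_eq_false_iff_not, not_or, not_and, not_not] at hsc
    split_ifs <;> first | rfl | (exfalso; omega)

theorem pvInner_bridge (rest : List (Int × Int)) : ∀ (mid : List (Int × Int)) (cur : Int × Int) (pre : List (Int × Int)),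
    (PySem.List.pyRange ((pre.length : Int) + 1 + (mid.length : Int))
        ((pre.length : Int) + 1 + (mid.length : Int) + (rest.length : Int)) 1).foldl
      (fun l2 j => pvInner (pre.length : Int) l2 j) (pre ++ cur :: (mid ++ rest))
    = pre ++ (pvGo cur rest).1 :: (mid ++ (pvGo cur rest).2) := by
  induction rest with
  | nil =>
    intro mid cur pre
    rw [PySem.List.pyRange_one_eq_nil (by simp)]
    simp [pvGo]
  | cons x rs ih =>
    intro mid cur pre
    rw [PySem.List.pyRange_one_cons (by simp only [List.length_cons]; push_cast; omega)]
    rw [List.foldl_cons]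
    rw [pvInner_at pre mid rs cur x]
    by_cases hsc : pvSwapCond cur x
    · rw [if_pos hsc]
      have hre : pre ++ x :: (mid ++ cur :: rs) = pre ++ x :: ((mid ++ [cur]) ++ rs) := by simp
      have hst : (pre.length : Int) + 1 + (mid.length : Int) + 1
          = (pre.length : Int) + 1 + (((mid ++ [cur]).length : Nat) : Int) := by
        simp only [List.length_append, List.length_cons, List.length_nil]
        push_cast; ring
      have hsp : (pre.length : Int) + 1 + (mid.length : Int) + ((x :: rs).length : Int)
          = (pre.length : Int) + 1 + (((mid ++ [cur]).length : Nat) : Int) + (rs.length : Int) := by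
        simp only [List.length_append, List.length_cons, List.length_nil]
        push_cast; ring
      rw [hre, hst, hsp, ih (mid ++ [cur]) x pre]
      simp only [pvGo, hsc, if_pos]
      simp
    · rw [if_neg hsc]
      have hre : pre ++ cur :: (mid ++ x :: rs) = pre ++ cur :: ((mid ++ [x]) ++ rs) := by simp
      have hst : (pre.length : Int) + 1 + (mid.length : Int) + 1
          = (pre.length : Int) + 1 + (((mid ++ [x]).length : Nat) : Int) := by
        simp only [List.length_append, List.length_cons, List.length_nil]
        push_cast; ring
      have hsp : (pre.length : Int) + 1 + (mid.length : Int) + ((x :: rs).length : Int)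
          = (pre.length : Int) + 1 + (((mid ++ [x]).length : Nat) : Int) + (rs.length : Int) := by
        simp only [List.length_append, List.length_cons, List.length_nil]
        push_cast; ring
      rw [hre, hst, hsp, ih (mid ++ [x]) cur pre]
      simp only [pvGo, hsc, if_neg, Bool.false_eq_true, not_false_iff]
      simp


theorem pvInner_loop (rest : List (Int × Int)) (cur : Int × Int) (pre : List (Int × Int)) :
    (PySem.List.pyRange (pre.length : Int) (((pre ++ cur :: rest).length : Int)) 1).foldl
      (fun l2 j => pvInner (pre.length : Int) l2 j) (pre ++ cur :: rest)
    = pre ++ (pvGo cur rest).1 :: (pvGo cur rest).2 := by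
  have hti : PySem.List.pyGetD (pre ++ cur :: rest) (pre.length : Int) ((0:Int),(0:Int)) = cur := by
    rw [PySem.List.pyGetD_natCast]; exact pvGetD_mid _ _ _ _
  have hsw : pvSwap (pre ++ cur :: rest) (pre.length : Int) (pre.length : Int) = pre ++ cur :: rest := by
    rw [pvSwap, hti, PySem.List.pySetD_natCast, PySem.List.pySetD_natCast, pvSet_mid, pvSet_mid]
  have hid : pvInner (pre.length : Int) (pre ++ cur :: rest) (pre.length : Int) = pre ++ cur :: rest := by
    simp only [pvInner, hti, hsw]
    split_ifs <;> rfl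
  have hlen : (((pre ++ cur :: rest).length : Nat) : Int) = (pre.length : Int) + 1 + (rest.length : Int) := by
    simp only [List.length_append, List.length_cons]; push_cast; ring
  have hb := pvInner_bridge rest [] cur pre
  simp only [List.length_nil, Nat.cast_zero, add_zero, List.nil_append] at hb
  rw [PySem.List.pyRange_one_cons (by simp only [List.length_append, List.length_cons]; push_cast; omega)]
  rw [List.foldl_cons, hid, hlen, hb]


theorem pvOuter_bridge (n : Nat) : ∀ (rest pre : List (Int × Int)), rest.length ≤ n →
    (PySem.List.pyRange (pre.length : Int) (((pre.length : Int) + (rest.length : Int)) - 1) 1).foldl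
      (fun l i => (PySem.List.pyRange i (l.length : Int) 1).foldl (fun l2 j => pvInner i l2 j) l)
      (pre ++ rest)
    = pre ++ pvSSort rest := by
  induction n with
  | zero =>
    intro rest pre h
    have : rest = [] := List.eq_nil_of_length_eq_zero (by omega)
    subst this
    rw [PySem.List.pyRange_one_eq_nil (by simp)]
    simp [pvSSort]
  | succ n ih =>
    intro rest pre h
    match rest with
    | [] =>
      rw [PySem.List.pyRange_one_eq_nil (by simp)]
      simp [pvSSort]
    | [x] =>
      rw [PySem.List.pyRange_one_eq_nil (by simp)]
      simp [pvSSort, pvGo]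
    | cur :: x :: rs =>
      rw [PySem.List.pyRange_one_cons (by simp only [List.length_cons]; push_cast; omega)]
      rw [List.foldl_cons]
      rw [pvInner_loop (x :: rs) cur pre]
      have hb := ih ((pvGo cur (x :: rs)).2) (pre ++ [(pvGo cur (x :: rs)).1])
        (by rw [pvGo_length]; simp only [List.length_cons] at h ⊢; omega)
      have hst : ((pre ++ [(pvGo cur (x :: rs)).1]).length : Int) = (pre.length : Int) + 1 := by
        simp
      rw [hst] at hb
      have hsp : (pre.length : Int) + 1 + ((pvGo cur (x :: rs)).2.length : Int) - 1
          = (pre.length : Int) + ((cur :: x :: rs).length : Int) - 1 := by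
        rw [pvGo_length]
        simp only [List.length_cons]
        push_cast; ring
      rw [hsp] at hb
      have hcat : (pre ++ [(pvGo cur (x :: rs)).1]) ++ (pvGo cur (x :: rs)).2
          = pre ++ (pvGo cur (x :: rs)).1 :: (pvGo cur (x :: rs)).2 := by simp
      rw [hcat] at hb
      rw [hb]
      rw [pvSSort]
      simp


theorem portA_eq_pvSSort (l : List (Int × Int)) : sort_by_interval_size l = pvSSort l := by
  have h := pvOuter_bridge l.length l [] (le_refl _)
  simp only [List.length_nil, Nat.cast_zero, List.nil_append, zero_add] at h
  rw [sort_by_interval_size]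
  exact h


theorem portB_eq_sorted (l : List (Int × Int)) :
    sort_by_interval_size_alt l = PySem.List.sorted l pvKey false := by
  rw [sort_by_interval_size_alt, PySem.List.sorted2, PySem.List.sorted_eq_foldl_insertBy]
  simp only [if_neg (by decide : ¬ (false = true))]
  congr 1
  funext acc x
  congr 1
  funext a b
  rw [Bool.eq_iff_iff]
  simp only [pvKey, Prod.Lex.toLex_lt_toLex, Bool.or_eq_true, Bool.and_eq_true,
    Bool.not_eq_true', decide_eq_true_eq, decide_eq_false_iff_not]
  omega

theorem pvKey_injective : Function.Injective pvKey := by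
  intro t u h
  simp only [pvKey] at h
  have h2 := Prod.ext (congrArg Prod.fst h) (congrArg Prod.snd h)
  have e1 : t.2 - t.1 = u.2 - u.1 := congrArg Prod.fst (congrArg (fun z => ofLex z) h)
  have e2 : t.1 = u.1 := congrArg Prod.snd (congrArg (fun z => ofLex z) h)
  exact Prod.ext e2 (by omega)

-- ===== VERDICT (by name: the statement is the Claim_ definition above) =====
theorem sort_by_interval_size_spec : Claim_equal_sort_by_interval_size := by
  intro l _
  unfold Spec_sort_by_interval_size
  rw [portA_eq_pvSSort, portB_eq_sorted]
  exact PySem.List.eq_of_perm_of_pairwise_le_of_injective pvKey pvKey_injective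
    ((pvSSort_perm l).trans (PySem.List.sorted_perm l pvKey false).symm)
    (pvSSort_pairwise l) (PySem.List.sorted_pairwise l pvKey)
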